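-- pv_equiv track=rewrite | github.com/sign-language-translator/sign-language-translator | sign_language_translator/text/utils.py | extract_supported_subsequences_indexes
-- ===== SOURCE A (Python) =====
-- from typing import Any, Iterable, List, Optional, Set, Tuple, Union
--
-- def extract_supported_subsequences_indexes(
--     sequence: Iterable[Any],
--     tags: Iterable[Any],
--     supported_tags: Set[Any],
--     skipped_items: Set[Any],
-- ) -> List[List[int]]:
--     """Extract indexes of supported subsequences from a sequence based on tags and skipped items.
--
--     Args:
--         sequence (Iterable[Any]): The input sequence.
--         tags (Iterable[Any]): Tags corresponding to each item in the sequence.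
--         supported_tags (Set[Any]): Set of tags indicating support for a subsequence.
--         skipped_items (Set[Any]): Set of items to be skipped.
--
--     Returns:
--         List[List[int]]: A list indices of supported subsequences, where each inner list represents a subsequence.
--
--     Examples:
--
--     .. code-block:: python
--
--         sequence = [1, 2, 3, 4, 5, 6]
--         tags = ['A', 'A', 'B', 'A', 'A', 'C']
--         supported_tags = {'A'}
--         skipped_items = {2}
--         extract_supported_subsequences(sequence, tags, supported_tags, skipped_items)
--         # [[0], [3, 4]]
--     """
--
--     all_subsequences = []
--     subsequence = []
--     for i, (token, tag) in enumerate(zip(sequence, tags)):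
--         if (tag in supported_tags) and (token not in skipped_items):
--             subsequence.append(i)
--         else:
--             if subsequence:
--                 all_subsequences.append(subsequence)
--                 subsequence = []
--
--     if subsequence:
--         all_subsequences.append(subsequence)
--
--     return all_subsequences
-- ===== SOURCE B (Python) =====
-- def extract_supported_subsequences_indexes(sequence, tags, supported_tags, skipped_items):
--     supported = [
--         i
--         for i, (token, tag) in enumerate(zip(sequence, tags))
--         if tag in supported_tags and token not in skipped_items
--     ]
--     groups = []
--     for idx in supported:
--         if groups and groups[-1][-1] == idx - 1:
--             groups[-1].append(idx)
--         else:
--             groups.append([idx])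
--     return groups
-- ===== Notes on version B (the rewrite author's own statement) =====
-- stated objective: alternative
-- what changed: A tracks the current run inside one fused pass with explicit run-flush logic; B first materializes the flat list of supported indices, then a second pass segments that list by gaps (last element of last group vs idx-1).
import Mathlib
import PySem

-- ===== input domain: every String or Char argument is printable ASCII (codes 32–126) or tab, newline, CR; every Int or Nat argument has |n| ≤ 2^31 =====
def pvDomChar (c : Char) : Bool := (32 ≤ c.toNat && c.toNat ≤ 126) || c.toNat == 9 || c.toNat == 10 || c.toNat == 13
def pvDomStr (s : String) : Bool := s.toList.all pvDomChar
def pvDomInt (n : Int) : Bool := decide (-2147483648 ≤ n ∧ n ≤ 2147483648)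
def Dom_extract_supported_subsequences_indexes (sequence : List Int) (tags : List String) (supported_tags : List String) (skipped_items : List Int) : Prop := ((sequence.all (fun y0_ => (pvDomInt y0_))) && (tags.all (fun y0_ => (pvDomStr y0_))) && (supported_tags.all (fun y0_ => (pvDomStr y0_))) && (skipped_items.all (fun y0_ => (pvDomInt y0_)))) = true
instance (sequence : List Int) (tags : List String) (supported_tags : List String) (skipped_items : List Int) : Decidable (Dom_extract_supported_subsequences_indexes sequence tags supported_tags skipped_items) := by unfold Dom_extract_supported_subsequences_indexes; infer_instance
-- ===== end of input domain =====

-- B materializes the flat list of supported indices first and then segments it by gaps in a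
-- second pass, instead of A's fused run-tracking loop; alternative decomposition, same cost.

-- shared helper: the support condition '(tag in supported_tags) and (token not in skipped_items)'
def pvKeep (supported_tags : List String) (skipped_items : List Int) (tok : Int) (tag : String) : Bool :=
  decide (tag ∈ supported_tags) && !decide (tok ∈ skipped_items)

-- ===== PORT A =====
def extract_supported_subsequences_indexes (sequence : List Int) (tags : List String) (supported_tags : List String) (skipped_items : List Int) : List (List Int) :=
  -- single pass: accumulate (all_subsequences, subsequence); flush the run on a non-supported item
  let fin := (PySem.List.enumerate (sequence.zip tags) 0).foldl
    (fun (st : List (List Int) × List Int) (p : Int × Int × String) =>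
      if pvKeep supported_tags skipped_items p.2.1 p.2.2 then (st.1, st.2 ++ [p.1])
      else if st.2 ≠ [] then (st.1 ++ [st.2], ([] : List Int)) else st)
    ([], [])
  if fin.2 ≠ [] then fin.1 ++ [fin.2] else fin.1

-- ===== PORT B =====
def extract_supported_subsequences_indexes_alt (sequence : List Int) (tags : List String) (supported_tags : List String) (skipped_items : List Int) : List (List Int) :=
  -- pass 1: flat list of supported indices
  let supported := (PySem.List.enumerate (sequence.zip tags) 0).filterMap
    (fun (p : Int × Int × String) => if pvKeep supported_tags skipped_items p.2.1 p.2.2 then some p.1 else none)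
  -- pass 2: segment the index list by contiguity
  supported.foldl
    (fun (groups : List (List Int)) (idx : Int) =>
      match groups.getLast? with
      | none => groups ++ [[idx]]
      | some g => if g.getLast? = some (idx - 1) then groups.dropLast ++ [g ++ [idx]] else groups ++ [[idx]])
    []

-- ===== PRECONDITION & SPEC =====
def Spec_extract_supported_subsequences_indexes (sequence : List Int) (tags : List String) (supported_tags : List String) (skipped_items : List Int) (out : List (List Int)) : Prop := out = extract_supported_subsequences_indexes_alt sequence tags supported_tags skipped_items
instance (sequence : List Int) (tags : List String) (supported_tags : List String) (skipped_items : List Int) (out : List (List Int)) : Decidable (Spec_extract_supported_subsequences_indexes sequence tags supported_tags skipped_items out) := by unfold Spec_extract_supported_subsequences_indexes; infer_instance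

-- ===== CLAIM (what is proved, stated in full; the proofs are below) =====
def Claim_equal_extract_supported_subsequences_indexes : Prop := ∀ (sequence : List Int) (tags : List String) (supported_tags : List String) (skipped_items : List Int), Dom_extract_supported_subsequences_indexes sequence tags supported_tags skipped_items → Spec_extract_supported_subsequences_indexes sequence tags supported_tags skipped_items (extract_supported_subsequences_indexes sequence tags supported_tags skipped_items)

-- ===== LEMMAS AND PROOFS =====

-- generic forms of the two loops, for the induction
def pvRunA (keep : Int → String → Bool) (l : List (Int × Int × String))
    (st : List (List Int) × List Int) : List (List Int) × List Int :=
  l.foldl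
    (fun (st : List (List Int) × List Int) (p : Int × Int × String) =>
      if keep p.2.1 p.2.2 then (st.1, st.2 ++ [p.1])
      else if st.2 ≠ [] then (st.1 ++ [st.2], ([] : List Int)) else st)
    st

def pvStepB (groups : List (List Int)) (idx : Int) : List (List Int) :=
  match groups.getLast? with
  | none => groups ++ [[idx]]
  | some g => if g.getLast? = some (idx - 1) then groups.dropLast ++ [g ++ [idx]] else groups ++ [[idx]]

lemma pv_main (keep : Int → String → Bool) :
    ∀ (l : List (Int × String)) (n : Int) (all : List (List Int)) (cur : List Int),
    (∀ x, cur = [] → (all.getLast?.bind List.getLast?) = some x → x < n - 1) →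
    (cur ≠ [] → cur.getLast? = some (n - 1)) →
    (let fin := pvRunA keep (PySem.List.enumerate l n) (all, cur);
      if fin.2 ≠ [] then fin.1 ++ [fin.2] else fin.1)
    = ((PySem.List.enumerate l n).filterMap
        (fun (p : Int × Int × String) => if keep p.2.1 p.2.2 then some p.1 else none)).foldl
        pvStepB (all ++ if cur = [] then [] else [cur]) := by
  intro l
  induction l with
  | nil =>
    intro n all cur _ _
    simp only [PySem.List.enumerate_nil, pvRunA, List.foldl_nil, List.filterMap_nil]
    by_cases h : cur = [] <;> simp [h]
  | cons p l ih =>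
    intro n all cur h1 h2
    simp only [PySem.List.enumerate_cons, pvRunA, List.foldl_cons, List.filterMap_cons] at *
    by_cases hk : keep p.1 p.2
    · -- supported item at index n
      simp only [hk, if_pos]
      have hstep : pvStepB (all ++ if cur = [] then [] else [cur]) n = all ++ [cur ++ [n]] := by
        by_cases hc : cur = []
        · subst hc
          simp only [pvStepB]
          cases hall : all.getLast? with
          | none => simp [List.getLast?_eq_none_iff.mp hall]
          | some g =>
            have hg : g.getLast? ≠ some (n - 1) := by
              cases hgl : g.getLast? with
              | none => simp
              | some x =>
                have := h1 x rfl (by rw [hall]; simpa using hgl)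
                intro hcon; injection hcon with hx; omega
            simp [hall, hg]
        · have hcl := h2 hc
          simp only [if_neg hc, pvStepB]
          rw [List.getLast?_append]
          simp [hcl]
      rw [List.foldl_cons, hstep]
      have := ih (n + 1) all (cur ++ [n])
        (by intro x hx; exact absurd hx (by simp))
        (by intro _; simp)
      simpa [pvRunA] using this
    · -- non-supported item at index n
      simp only [hk, Bool.false_eq_true, if_false]
      by_cases hc : cur = []
      · subst hc
        simp only [ne_eq, not_true_eq_false, if_neg, not_false_eq_true]
        have := ih (n + 1) all []
          (by intro x _ hx; have := h1 x rfl hx; omega)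
          (by intro h; exact absurd rfl h)
        simpa [pvRunA] using this
      · simp only [ne_eq, hc, not_false_eq_true, if_pos]
        have := ih (n + 1) (all ++ [cur]) []
          (by
            intro x _ hx
            rw [List.getLast?_append] at hx
            simp [h2 hc] at hx
            omega)
          (by intro h; exact absurd rfl h)
        simpa [pvRunA, hc] using this

-- ===== VERDICT (by name: the statement is the Claim_ definition above) =====
theorem extract_supported_subsequences_indexes_spec : Claim_equal_extract_supported_subsequences_indexes := by
  intro sequence tags supported_tags skipped_items _
  unfold Spec_extract_supported_subsequences_indexes
  unfold extract_supported_subsequences_indexes extract_supported_subsequences_indexes_alt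
  have := pv_main (pvKeep supported_tags skipped_items) (sequence.zip tags) 0 [] []
    (by simp) (by intro h; exact absurd rfl h)
  simpa [pvRunA, pvStepB] using this
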